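-- pv_equiv track=rewrite | github.com/marian37/advent-of-code-2023 | 01.py | matchesNumber
-- ===== SOURCE A (Python) =====
-- def matchesNumber(text):
--     numbers = [
--         "zero",
--         "one",
--         "two",
--         "three",
--         "four",
--         "five",
--         "six",
--         "seven",
--         "eight",
--         "nine",
--     ]
--     for i in range(0, len(numbers)):
--         if text.startswith(numbers[i]):
--             return str(i)
--     return ""
-- ===== SOURCE B (Python) =====
-- def matchesNumber(text):
--     words = {
--         "zero": "0", "one": "1", "two": "2", "three": "3", "four": "4",
--         "five": "5", "six": "6", "seven": "7", "eight": "8", "nine": "9",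
--     }
--     for length in (3, 4, 5):
--         digit = words.get(text[:length])
--         if digit is not None:
--             return digit
--     return ""
-- ===== Notes on version B (the rewrite author's own statement) =====
-- stated objective: alternative
-- what changed: Replaces A's ordered scan calling text.startswith on each of the ten number words by a word-to-digit dict probed with the three fixed-width prefixes text[:3], text[:4], text[:5] (hash lookups instead of ten prefix comparisons).
import Mathlib
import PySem

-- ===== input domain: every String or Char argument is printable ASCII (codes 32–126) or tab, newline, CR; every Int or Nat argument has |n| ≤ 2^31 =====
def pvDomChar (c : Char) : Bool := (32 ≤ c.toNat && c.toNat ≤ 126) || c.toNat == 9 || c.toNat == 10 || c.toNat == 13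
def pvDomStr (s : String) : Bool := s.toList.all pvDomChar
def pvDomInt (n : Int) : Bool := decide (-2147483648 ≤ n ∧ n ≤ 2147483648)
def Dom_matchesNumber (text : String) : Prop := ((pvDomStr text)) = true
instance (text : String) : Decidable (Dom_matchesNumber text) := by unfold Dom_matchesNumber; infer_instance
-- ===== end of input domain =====

-- B replaces A's ordered startswith scan over all ten number words by a word→digit dict
-- probed with the three fixed-width prefixes text[:3], text[:4], text[:5] (objective: alternative).

-- ===== PORT A =====
def matchesNumberNums : List String :=
  ["zero", "one", "two", "three", "four", "five", "six", "seven", "eight", "nine"]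

-- the for-i-in-range loop with its early return, as structural recursion over the index list
def matchesNumberLoop (text : String) : List Int → String
  | [] => ""
  | i :: rest =>
      if PySem.Str.startswith text (PySem.List.pyGetD matchesNumberNums i "") then
        PySem.Int.toStr i
      else matchesNumberLoop text rest

def matchesNumber (text : String) : String :=
  matchesNumberLoop text (PySem.List.pyRange 0 (matchesNumberNums.length : Int) 1)

-- ===== PORT B =====
def matchesNumberWords : PySem.Dict String String :=
  PySem.Dict.ofList [("zero", "0"), ("one", "1"), ("two", "2"), ("three", "3"), ("four", "4"),
    ("five", "5"), ("six", "6"), ("seven", "7"), ("eight", "8"), ("nine", "9")]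

-- the for-length-in-(3,4,5) loop: words.get(text[:length]), return on a hit
def matchesNumberAltLoop (text : String) : List Int → String
  | [] => ""
  | L :: rest =>
      match PySem.Dict.get? matchesNumberWords (PySem.Str.slice text none (some L)) with
      | some digit => digit
      | none => matchesNumberAltLoop text rest

def matchesNumber_alt (text : String) : String :=
  matchesNumberAltLoop text [3, 4, 5]

-- ===== PRECONDITION & SPEC =====
def Spec_matchesNumber (text : String) (out : String) : Prop := out = matchesNumber_alt text
instance (text : String) (out : String) : Decidable (Spec_matchesNumber text out) := by unfold Spec_matchesNumber; infer_instance

-- ===== CLAIM (what is proved, stated in full; the proofs are below) =====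
def Claim_equal_matchesNumber : Prop := ∀ (text : String), Dom_matchesNumber text → Spec_matchesNumber text (matchesNumber text)

-- ===== LEMMAS AND PROOFS =====

-- A's if-chain, expressed on the character list: text.startswith w ↔ take |w| = w
def chainA (l : List Char) : String :=
  if l.take 4 = ['z','e','r','o'] then "0"
  else if l.take 3 = ['o','n','e'] then "1"
  else if l.take 3 = ['t','w','o'] then "2"
  else if l.take 5 = ['t','h','r','e','e'] then "3"
  else if l.take 4 = ['f','o','u','r'] then "4"
  else if l.take 4 = ['f','i','v','e'] then "5"
  else if l.take 3 = ['s','i','x'] then "6"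
  else if l.take 5 = ['s','e','v','e','n'] then "7"
  else if l.take 5 = ['e','i','g','h','t'] then "8"
  else if l.take 4 = ['n','i','n','e'] then "9"
  else ""

-- words.get(text[:3]) on the character list: only the keys a ≤3-char prefix can equal, in dict order
def dict3 (l : List Char) : Option String :=
  if l.take 3 = ['o','n','e'] then some "1"
  else if l.take 3 = ['t','w','o'] then some "2"
  else if l.take 3 = ['s','i','x'] then some "6"
  else none

-- words.get(text[:4]): the ≤4-char keys, in dict order
def dict4 (l : List Char) : Option String :=
  if l.take 4 = ['z','e','r','o'] then some "0"
  else if l.take 4 = ['o','n','e'] then some "1"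
  else if l.take 4 = ['t','w','o'] then some "2"
  else if l.take 4 = ['f','o','u','r'] then some "4"
  else if l.take 4 = ['f','i','v','e'] then some "5"
  else if l.take 4 = ['s','i','x'] then some "6"
  else if l.take 4 = ['n','i','n','e'] then some "9"
  else none

-- words.get(text[:5]): all ten keys, in dict order
def dict5 (l : List Char) : Option String :=
  if l.take 5 = ['z','e','r','o'] then some "0"
  else if l.take 5 = ['o','n','e'] then some "1"
  else if l.take 5 = ['t','w','o'] then some "2"
  else if l.take 5 = ['t','h','r','e','e'] then some "3"
  else if l.take 5 = ['f','o','u','r'] then some "4"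
  else if l.take 5 = ['f','i','v','e'] then some "5"
  else if l.take 5 = ['s','i','x'] then some "6"
  else if l.take 5 = ['s','e','v','e','n'] then some "7"
  else if l.take 5 = ['e','i','g','h','t'] then some "8"
  else if l.take 5 = ['n','i','n','e'] then some "9"
  else none

-- B's three-probe chain on the character list
def chainB (l : List Char) : String :=
  (dict3 l).getD ((dict4 l).getD ((dict5 l).getD ""))

theorem getD_ite {α : Type} (c : Prop) [Decidable c] (x y : Option α) (k : α) :
    (if c then x else y).getD k = if c then x.getD k else y.getD k := by
  split_ifs <;> rfl

theorem eq_ofList_lit (p : String) (xs : List Char) : (p = String.ofList xs) = (xs = p.toList) := by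
  apply propext; constructor
  · intro h; have := congrArg String.toList h; simpa using this.symm
  · rintro rfl; simp

theorem sw_lit (s p : String) (pl : List Char) (n : Nat) (h : p.toList = pl)
    (hn : pl.length = n) :
    (PySem.Str.startswith s p = true) = (s.toList.take n = pl) := by
  apply propext
  rw [show PySem.Str.startswith s p = PySem.Chars.startswith s.toList pl from by
        rw [PySem.Str.startswith_eq, h],
      PySem.Chars.startswith_iff, List.prefix_iff_eq_take, hn]
  exact eq_comm

theorem cand_take (s : String) (n : Nat) :
    PySem.Str.slice s none (some (n : Int)) = String.ofList (s.toList.take n) := by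
  simp [PySem.Str.slice, PySem.List.slice_to_natCast]

theorem wordsDict_eq : matchesNumberWords =
    PySem.Dict.mk [("zero", "0"), ("one", "1"), ("two", "2"), ("three", "3"), ("four", "4"),
      ("five", "5"), ("six", "6"), ("seven", "7"), ("eight", "8"), ("nine", "9")] := by decide

theorem get3 (xs : List Char) (h : xs.length ≤ 3) :
    PySem.Dict.get? matchesNumberWords (String.ofList xs) =
      (if xs = ['o','n','e'] then some "1" else if xs = ['t','w','o'] then some "2"
       else if xs = ['s','i','x'] then some "6" else none) := by
  have hz : xs ≠ ['z','e','r','o'] := by rintro rfl; simp at h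
  have hth : xs ≠ ['t','h','r','e','e'] := by rintro rfl; simp at h
  have hfo : xs ≠ ['f','o','u','r'] := by rintro rfl; simp at h
  have hfi : xs ≠ ['f','i','v','e'] := by rintro rfl; simp at h
  have hse : xs ≠ ['s','e','v','e','n'] := by rintro rfl; simp at h
  have hei : xs ≠ ['e','i','g','h','t'] := by rintro rfl; simp at h
  have hni : xs ≠ ['n','i','n','e'] := by rintro rfl; simp at h
  rw [wordsDict_eq]
  simp only [PySem.Dict.get?_mk_cons, beq_iff_eq, eq_ofList_lit]
  by_cases h1 : xs = ['o','n','e'] <;> by_cases h2 : xs = ['t','w','o'] <;>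
    by_cases h3 : xs = ['s','i','x'] <;>
    simp [h1, h2, h3, hz, hth, hfo, hfi, hse, hei, hni, PySem.Dict.get?]

theorem get4 (xs : List Char) (h : xs.length ≤ 4) :
    PySem.Dict.get? matchesNumberWords (String.ofList xs) =
      (if xs = ['z','e','r','o'] then some "0" else if xs = ['o','n','e'] then some "1"
       else if xs = ['t','w','o'] then some "2" else if xs = ['f','o','u','r'] then some "4"
       else if xs = ['f','i','v','e'] then some "5" else if xs = ['s','i','x'] then some "6"
       else if xs = ['n','i','n','e'] then some "9" else none) := by
  have hth : xs ≠ ['t','h','r','e','e'] := by rintro rfl; simp at h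
  have hse : xs ≠ ['s','e','v','e','n'] := by rintro rfl; simp at h
  have hei : xs ≠ ['e','i','g','h','t'] := by rintro rfl; simp at h
  rw [wordsDict_eq]
  simp only [PySem.Dict.get?_mk_cons, beq_iff_eq, eq_ofList_lit]
  by_cases h1 : xs = ['z','e','r','o'] <;> by_cases h2 : xs = ['o','n','e'] <;>
    by_cases h3 : xs = ['t','w','o'] <;> by_cases h4 : xs = ['f','o','u','r'] <;>
    by_cases h5 : xs = ['f','i','v','e'] <;> by_cases h6 : xs = ['s','i','x'] <;>
    by_cases h7 : xs = ['n','i','n','e'] <;>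
    simp [h1, h2, h3, h4, h5, h6, h7, hth, hse, hei, PySem.Dict.get?]

set_option maxHeartbeats 4000000 in
theorem get5 (xs : List Char) :
    PySem.Dict.get? matchesNumberWords (String.ofList xs) =
      (if xs = ['z','e','r','o'] then some "0" else if xs = ['o','n','e'] then some "1"
       else if xs = ['t','w','o'] then some "2" else if xs = ['t','h','r','e','e'] then some "3"
       else if xs = ['f','o','u','r'] then some "4" else if xs = ['f','i','v','e'] then some "5"
       else if xs = ['s','i','x'] then some "6" else if xs = ['s','e','v','e','n'] then some "7"
       else if xs = ['e','i','g','h','t'] then some "8" else if xs = ['n','i','n','e'] then some "9"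
       else none) := by
  rw [wordsDict_eq]
  simp only [PySem.Dict.get?_mk_cons, beq_iff_eq, eq_ofList_lit,
    show (PySem.Dict.mk ([] : List (String × String))).get? (String.ofList xs) = none from rfl,
    show ("zero" : String).toList = ['z','e','r','o'] from rfl,
    show ("one" : String).toList = ['o','n','e'] from rfl,
    show ("two" : String).toList = ['t','w','o'] from rfl,
    show ("three" : String).toList = ['t','h','r','e','e'] from rfl,
    show ("four" : String).toList = ['f','o','u','r'] from rfl,
    show ("five" : String).toList = ['f','i','v','e'] from rfl,
    show ("six" : String).toList = ['s','i','x'] from rfl,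
    show ("seven" : String).toList = ['s','e','v','e','n'] from rfl,
    show ("eight" : String).toList = ['e','i','g','h','t'] from rfl,
    show ("nine" : String).toList = ['n','i','n','e'] from rfl]

set_option maxHeartbeats 4000000 in
theorem A_eq_chainA (text : String) : matchesNumber text = chainA text.toList := by
  unfold matchesNumber
  rw [show PySem.List.pyRange 0 (matchesNumberNums.length : Int) 1 = [0,1,2,3,4,5,6,7,8,9] from by decide]
  simp only [matchesNumberLoop,
    show PySem.List.pyGetD matchesNumberNums 0 "" = "zero" from by decide,
    show PySem.List.pyGetD matchesNumberNums 1 "" = "one" from by decide,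
    show PySem.List.pyGetD matchesNumberNums 2 "" = "two" from by decide,
    show PySem.List.pyGetD matchesNumberNums 3 "" = "three" from by decide,
    show PySem.List.pyGetD matchesNumberNums 4 "" = "four" from by decide,
    show PySem.List.pyGetD matchesNumberNums 5 "" = "five" from by decide,
    show PySem.List.pyGetD matchesNumberNums 6 "" = "six" from by decide,
    show PySem.List.pyGetD matchesNumberNums 7 "" = "seven" from by decide,
    show PySem.List.pyGetD matchesNumberNums 8 "" = "eight" from by decide,
    show PySem.List.pyGetD matchesNumberNums 9 "" = "nine" from by decide,
    sw_lit text "zero" ['z','e','r','o'] 4 rfl rfl, sw_lit text "one" ['o','n','e'] 3 rfl rfl,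
    sw_lit text "two" ['t','w','o'] 3 rfl rfl, sw_lit text "three" ['t','h','r','e','e'] 5 rfl rfl,
    sw_lit text "four" ['f','o','u','r'] 4 rfl rfl, sw_lit text "five" ['f','i','v','e'] 4 rfl rfl,
    sw_lit text "six" ['s','i','x'] 3 rfl rfl, sw_lit text "seven" ['s','e','v','e','n'] 5 rfl rfl,
    sw_lit text "eight" ['e','i','g','h','t'] 5 rfl rfl, sw_lit text "nine" ['n','i','n','e'] 4 rfl rfl,
    show PySem.Int.toStr 0 = "0" from by decide, show PySem.Int.toStr 1 = "1" from by decide,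
    show PySem.Int.toStr 2 = "2" from by decide, show PySem.Int.toStr 3 = "3" from by decide,
    show PySem.Int.toStr 4 = "4" from by decide, show PySem.Int.toStr 5 = "5" from by decide,
    show PySem.Int.toStr 6 = "6" from by decide, show PySem.Int.toStr 7 = "7" from by decide,
    show PySem.Int.toStr 8 = "8" from by decide, show PySem.Int.toStr 9 = "9" from by decide]
  unfold chainA
  split_ifs <;> rfl

set_option maxHeartbeats 4000000 in
theorem B_eq_chainB (text : String) : matchesNumber_alt text = chainB text.toList := by
  unfold matchesNumber_alt
  simp only [matchesNumberAltLoop]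
  rw [show PySem.Str.slice text none (some 3) = String.ofList (text.toList.take 3) from by
        simpa using cand_take text 3,
      show PySem.Str.slice text none (some 4) = String.ofList (text.toList.take 4) from by
        simpa using cand_take text 4,
      show PySem.Str.slice text none (some 5) = String.ofList (text.toList.take 5) from by
        simpa using cand_take text 5,
      get3 _ (by simp), get4 _ (by simp), get5 _]
  show (match dict3 text.toList with
        | some digit => digit
        | none =>
          match dict4 text.toList with
          | some digit => digit
          | none =>
            match dict5 text.toList with
            | some digit => digit
            | none => "") = chainB text.toList
  unfold chainB
  cases dict3 text.toList <;> cases dict4 text.toList <;> cases dict5 text.toList <;> rfl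

set_option maxHeartbeats 4000000 in
theorem chain_eq (l : List Char) : chainA l = chainB l := by
  unfold chainA chainB dict3 dict4 dict5
  simp only [getD_ite, Option.getD_some, Option.getD_none]
  match l with
  | [] => simp
  | [a] => simp
  | [a, b] => simp
  | [a, b, c] => simp [List.take]; split_ifs <;> simp_all
  | [a, b, c, d] => simp [List.take]; split_ifs <;> simp_all
  | a :: b :: c :: d :: e :: rest => simp [List.take]; split_ifs <;> simp_all

-- ===== VERDICT (by name: the statement is the Claim_ definition above) =====
theorem matchesNumber_spec : Claim_equal_matchesNumber := by
  intro text _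
  unfold Spec_matchesNumber
  rw [A_eq_chainA, B_eq_chainB, chain_eq]
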